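-- pv_equiv track=rewrite | github.com/vhermecz/competitive-coding | aoc2020/day10/sol.py | rle1
-- ===== SOURCE A (Python) =====
-- def rle1(delta):
--     cnt = 0
--     for i in delta:
--         if i == 1:
--             cnt += 1
--         if i == 3:
--             yield cnt
--             cnt = 0
--     if cnt:
--         yield cnt
-- ===== SOURCE B (Python) =====
-- def rle1(delta):
--     # Build a delimited string ('1' per 1, '|' per 3, nothing otherwise),
--     # split it on the delimiter, and measure the segments.
--     s = "".join("1" if i == 1 else "|" if i == 3 else "" for i in delta)
--     *init, last = s.split("|")
--     for seg in init:
--         yield len(seg)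
--     if last:
--         yield len(last)
-- ===== Notes on version B (the rewrite author's own statement) =====
-- stated objective: alternative
-- what changed: Replaces A's streaming counter-with-flushes by building a '|'-delimited string of '1's in one pass and then splitting it and yielding segment lengths.
import Mathlib
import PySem

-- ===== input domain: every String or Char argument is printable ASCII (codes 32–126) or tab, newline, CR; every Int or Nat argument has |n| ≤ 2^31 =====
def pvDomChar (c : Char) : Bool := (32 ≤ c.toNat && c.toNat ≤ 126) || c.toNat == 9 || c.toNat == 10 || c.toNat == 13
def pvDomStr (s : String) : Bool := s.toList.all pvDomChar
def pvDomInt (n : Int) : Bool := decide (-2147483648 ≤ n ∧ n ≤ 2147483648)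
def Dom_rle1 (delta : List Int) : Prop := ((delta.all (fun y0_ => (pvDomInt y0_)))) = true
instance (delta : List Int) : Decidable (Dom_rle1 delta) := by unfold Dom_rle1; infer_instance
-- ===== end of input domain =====

-- B builds a '|'-delimited string of '1's, splits it and measures the segments, instead of A's
-- streaming counter (objective: alternative decomposition; return-value equivalence of the listed generators).


-- ===== PORT A =====
-- A is a generator; its port returns the list of yielded values, in order.
def rle1Go : List Int → Int → List Int
  | [], cnt => if cnt ≠ 0 then [cnt] else []
  | i :: rest, cnt =>
    let cnt2 := if i = 1 then cnt + 1 else cnt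
    if i = 3 then cnt2 :: rle1Go rest 0 else rle1Go rest cnt2

def rle1 (delta : List Int) : List Int := rle1Go delta 0

-- ===== PORT B =====
-- ''.join of the per-element pieces = flatMap of the per-element character lists.
def rle1AltChars (delta : List Int) : List Char :=
  delta.flatMap (fun i => if i = 1 then ['1'] else if i = 3 then ['|'] else [])

-- hand port of Python's str.split('|') (single-character separator): exact —
-- ''.split('|') = [''], every '|' starts a new (possibly empty) segment.
def splitBar : List Char → List (List Char)
  | [] => [[]]
  | c :: rest =>
    let r := splitBar rest
    if c = '|' then [] :: r
    else
      match r with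
      | [] => [[c]]          -- unreachable: splitBar never returns []
      | s :: t => (c :: s) :: t

def rle1_alt (delta : List Int) : List Int :=
  let segs := splitBar (rle1AltChars delta)
  let init := segs.dropLast
  let last := segs.getLastD []
  let out := init.map (fun seg => (seg.length : Int))
  if last ≠ [] then out ++ [(last.length : Int)] else out

-- ===== PRECONDITION & SPEC =====
def Spec_rle1 (delta : List Int) (out : List Int) : Prop := out = rle1_alt delta
instance (delta : List Int) (out : List Int) : Decidable (Spec_rle1 delta out) := by unfold Spec_rle1; infer_instance

-- ===== CLAIM (what is proved, stated in full; the proofs are below) =====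
def Claim_equal_rle1 : Prop := ∀ (delta : List Int), Dom_rle1 delta → Spec_rle1 delta (rle1 delta)

-- ===== LEMMAS AND PROOFS =====

-- bridge between the two shapes: A's loop starting with counter cnt, versus the
-- segments of the delimited string with cnt added to the first segment's length.
def finishSegs : Int → List (List Char) → List Int
  | cnt, [] => [cnt]      -- unreachable (splitBar is never empty); harmless default
  | cnt, [s] => if cnt + (s.length : Int) ≠ 0 then [cnt + (s.length : Int)] else []
  | cnt, s :: t => (cnt + (s.length : Int)) :: finishSegs 0 t

theorem splitBar_ne_nil (l : List Char) : splitBar l ≠ [] := by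
  cases l with
  | nil => simp [splitBar]
  | cons c rest =>
    simp only [splitBar]
    split_ifs with h
    · simp
    · cases splitBar rest <;> simp

theorem finishSegs_shift (c : Char) (cnt : Int) (s : List Char) (t : List (List Char)) :
    finishSegs cnt ((c :: s) :: t) = finishSegs (cnt + 1) (s :: t) := by
  cases t <;> simp [finishSegs] <;> ring_nf

theorem rle1Go_eq_finishSegs (l : List Int) (cnt : Int) :
    rle1Go l cnt = finishSegs cnt (splitBar (rle1AltChars l)) := by
  induction l generalizing cnt with
  | nil => simp [rle1Go, rle1AltChars, splitBar, finishSegs]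
  | cons i rest ih =>
    by_cases h1 : i = 1
    · have : rle1AltChars (i :: rest) = '1' :: rle1AltChars rest := by
        simp [rle1AltChars, h1]
      rw [this]
      have h3 : i ≠ 3 := by omega
      have hgo : rle1Go (i :: rest) cnt = rle1Go rest (cnt + 1) := by
        simp [rle1Go, h1]
      rw [hgo, ih]
      simp only [splitBar]
      obtain ⟨s, t, hst⟩ : ∃ s t, splitBar (rle1AltChars rest) = s :: t := by
        cases hh : splitBar (rle1AltChars rest) with
        | nil => exact absurd hh (splitBar_ne_nil _)
        | cons s t => exact ⟨s, t, rfl⟩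
      rw [hst]
      simp only [if_neg (by decide : ¬ ('1' : Char) = '|')]
      exact (finishSegs_shift '1' cnt s t).symm
    · by_cases h3 : i = 3
      · have : rle1AltChars (i :: rest) = '|' :: rle1AltChars rest := by
          simp [rle1AltChars, h3]
        rw [this]
        have hgo : rle1Go (i :: rest) cnt = cnt :: rle1Go rest 0 := by
          simp only [rle1Go, if_pos h3, if_neg h1]
        rw [hgo, ih]
        simp only [splitBar]
        obtain ⟨s, t, hst⟩ : ∃ s t, splitBar (rle1AltChars rest) = s :: t := by
          cases hh : splitBar (rle1AltChars rest) with
          | nil => exact absurd hh (splitBar_ne_nil _)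
          | cons s t => exact ⟨s, t, rfl⟩
        rw [hst]
        cases t <;> simp [finishSegs]
      · have : rle1AltChars (i :: rest) = rle1AltChars rest := by
          simp [rle1AltChars, h1, h3]
        rw [this]
        have hgo : rle1Go (i :: rest) cnt = rle1Go rest cnt := by
          simp [rle1Go, h1, h3]
        rw [hgo]; exact ih cnt

theorem finishSegs_zero_eq_alt (segs : List (List Char)) (hne : segs ≠ []) :
    finishSegs 0 segs =
      (if segs.getLastD [] ≠ [] then
        (segs.dropLast.map (fun seg => (seg.length : Int))) ++ [((segs.getLastD []).length : Int)]
      else segs.dropLast.map (fun seg => (seg.length : Int))) := by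
  induction segs with
  | nil => exact absurd rfl hne
  | cons s t ih =>
    cases t with
    | nil =>
      simp only [finishSegs, zero_add]
      simp only [List.dropLast, List.map_nil, List.nil_append, List.getLastD]
      by_cases hs : s = []
      · subst hs; simp
      · simp [hs, List.length_eq_zero_iff]
    | cons r u =>
      have ih' := ih (by simp)
      simp only [finishSegs, zero_add] at ih' ⊢
      rw [ih']
      have hdl : (s :: r :: u).dropLast = s :: (r :: u).dropLast := by simp
      have hgl : (s :: r :: u).getLastD [] = (r :: u).getLastD [] := by
        simp
      rw [hdl, hgl, List.map_cons]
      split_ifs with hc <;> simp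

-- ===== VERDICT (by name: the statement is the Claim_ definition above) =====
theorem rle1_spec : Claim_equal_rle1 := by
  intro delta _
  show rle1 delta = rle1_alt delta
  have h := finishSegs_zero_eq_alt (splitBar (rle1AltChars delta)) (splitBar_ne_nil _)
  calc rle1 delta = finishSegs 0 (splitBar (rle1AltChars delta)) := rle1Go_eq_finishSegs delta 0
    _ = rle1_alt delta := by unfold rle1_alt; exact h
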